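-- pv_equiv track=rewrite | github.com/annestrand/flintRV | scripts/common.py | asmStr2AsmList
-- ===== SOURCE A (Python) =====
-- def asmStr2AsmList(asmStr:str):
--     '''Converts multi-line assembly string to a list of assembly lists'''
--     asmStr =    asmStr.split('\n')
--     asmStr =    [x.strip(' ') for x in asmStr]
--     asmStr =    [x for x in asmStr if x]
--     asmStr =    [x.replace(':', ': ') for x in asmStr if x]
--     asmStr =    [x.replace('#', ' # ') for x in asmStr if x]
--     asmStr =    [x for x in asmStr if x]
--     asmStr =    [x.split(' ') for x in asmStr]
--     asmStr =    [[y for y in x if y] for x in asmStr]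
--     asmStr =    [x for x in asmStr if x[0][0] != '#']
--     asmStr =    [x[0:x.index('#')] if '#' in x else x for x in asmStr]
--     asmStr =    [x[1:] if ':' in x[0] else x for x in asmStr]
--     asmStr =    [x for x in asmStr if x]
--     return      [[y.replace(',', '') for y in x] for x in asmStr]
-- ===== SOURCE B (Python) =====
-- def asmStr2AsmList(asmStr:str):
--     '''Converts multi-line assembly string to a list of assembly lists'''
--     result = []
--     for line in asmStr.split('\n'):
--         toks = []
--         cur = []
--         drop = False
--         for ch in line.strip(' '):
--             if ch == '#':                 # comment: stop scanning this line
--                 if cur: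
--                     toks.append(''.join(cur))
--                     cur = []
--                 if not toks:
--                     drop = True           # comment-only line
--                 break
--             elif ch == ' ':               # token boundary
--                 if cur:
--                     toks.append(''.join(cur))
--                     cur = []
--             elif ch == ':':               # ':' always ends a token (kept on it)
--                 cur.append(':')
--                 toks.append(''.join(cur))
--                 cur = []
--             else:
--                 cur.append(ch)
--         else:
--             if cur:
--                 toks.append(''.join(cur))
--         if drop or not toks:
--             continue
--         if ':' in toks[0]:                # leading label: drop it
--             toks = toks[1:]
--         if toks:
--             result.append([t.replace(',', '') for t in toks])
--     return result
-- ===== Notes on version B (the rewrite author's own statement) =====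
-- stated objective: alternative
-- what changed: Replaced A's twelve replace/split/filter whole-list passes with a character-level state machine that scans each line once, building tokens directly (':' ends a token, ' ' is a boundary, '#' stops the scan), so no intermediate replaced strings or raw split lists are ever materialized.
import Mathlib
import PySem

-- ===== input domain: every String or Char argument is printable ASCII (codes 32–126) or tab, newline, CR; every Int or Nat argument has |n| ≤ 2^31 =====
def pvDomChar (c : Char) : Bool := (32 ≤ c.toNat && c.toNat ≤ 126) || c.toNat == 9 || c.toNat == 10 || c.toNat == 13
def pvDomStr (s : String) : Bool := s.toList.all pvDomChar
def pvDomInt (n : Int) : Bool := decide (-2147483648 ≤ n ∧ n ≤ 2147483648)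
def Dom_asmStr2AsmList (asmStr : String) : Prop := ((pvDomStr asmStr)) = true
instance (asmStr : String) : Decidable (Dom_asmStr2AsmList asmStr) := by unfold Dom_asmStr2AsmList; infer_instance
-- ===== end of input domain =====

-- B replaces A's twelve replace/split/filter whole-list passes by a character-level
-- state machine that scans each line once, emitting tokens directly (objective: alternative).

-- ===== PORT A =====
-- Literal port of A's twelve passes, in order.  The Python x[0] / x[0][0] accesses
-- are ported with pyGet? + a default; in A those accesses always see nonempty lists
-- (every kept line has a nonempty token list with nonempty tokens), so the default
-- branch is unreachable and never raises in Python.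
def asmStr2AsmList (asmStr : String) : List (List String) :=
  let a1 := (PySem.Str.split? asmStr "\n").getD []          -- sep "\n" ≠ "": split? is never none
  let a2 := a1.map (fun x => PySem.Str.stripChars x " ")
  let a3 := a2.filter (fun x => x != "")
  let a4 := (a3.filter (fun x => x != "")).map (fun x => PySem.Str.replace x ":" ": ")
  let a5 := (a4.filter (fun x => x != "")).map (fun x => PySem.Str.replace x "#" " # ")
  let a6 := a5.filter (fun x => x != "")
  let a7 := a6.map (fun x => (PySem.Str.split? x " ").getD [])   -- sep " " ≠ ""
  let a8 := a7.map (fun x => x.filter (fun y => y != ""))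
  let a9 := a8.filter (fun x => !(PySem.Str.pyGet? ((PySem.List.pyGet? x 0).getD "") 0 == some '#'))
  let a10 := a9.map (fun x => if x.contains "#" then PySem.List.slice x (some 0) (some (((PySem.List.index? x "#").getD 0 : Nat) : Int)) else x)
  let a11 := a10.map (fun x => if PySem.Str.isIn ":" ((PySem.List.pyGet? x 0).getD "") then PySem.List.slice x (some 1) none else x)
  let a12 := a11.filter (fun x => x != ([] : List String))
  a12.map (fun x => x.map (fun y => PySem.Str.replace y "," ""))

-- ===== PORT B =====
-- Literal port of Source B: per line, a character-level state machine (the inner for/else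
-- loop): ' ' flushes the current token, ':' ends the token keeping the colon, '#'
-- flushes and stops the scan (setting the comment-only drop flag if nothing was
-- emitted).  pvScan cs toks cur returns (toks, drop) — the loop state after break/else.
def pvScan : List Char → List String → List Char → List String × Bool
  | [], toks, cur => (if cur != [] then toks ++ [String.ofList cur] else toks, false)
  | c :: rest, toks, cur =>
    if c = '#' then
      let toks' := if cur != [] then toks ++ [String.ofList cur] else toks
      (toks', toks' == [])
    else if c = ' ' then
      pvScan rest (if cur != [] then toks ++ [String.ofList cur] else toks) []
    else if c = ':' then
      pvScan rest (toks ++ [String.ofList (cur ++ [':'])]) []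
    else
      pvScan rest toks (cur ++ [c])

-- the loop body of Source B (one line processed, result appended to the accumulator)
def pvStep (result : List (List String)) (line : String) : List (List String) :=
  let res := pvScan (PySem.Str.stripChars line " ").toList [] []
  if res.2 || res.1 == [] then result
  else
    let toks1 := if PySem.Str.isIn ":" ((PySem.List.pyGet? res.1 0).getD "") then PySem.List.slice res.1 (some 1) none else res.1
    if toks1 == [] then result
    else result ++ [toks1.map (fun t => PySem.Str.replace t "," "")]

def asmStr2AsmList_alt (asmStr : String) : List (List String) :=
  ((PySem.Str.split? asmStr "\n").getD []).foldl pvStep []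

-- ===== PRECONDITION & SPEC =====
def Spec_asmStr2AsmList (asmStr : String) (out : List (List String)) : Prop := out = asmStr2AsmList_alt asmStr
instance (asmStr : String) (out : List (List String)) : Decidable (Spec_asmStr2AsmList asmStr out) := by unfold Spec_asmStr2AsmList; infer_instance

-- ===== CLAIM (what is proved, stated in full; the proofs are below) =====
def Claim_equal_asmStr2AsmList : Prop := ∀ (asmStr : String), Dom_asmStr2AsmList asmStr → Spec_asmStr2AsmList asmStr (asmStr2AsmList asmStr)

-- ===== LEMMAS AND PROOFS =====

-- A's stages 10 and 11 as named functions, and A's token list of one line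
def pvToksOf (s : String) : List String :=
  ((PySem.Str.split? (PySem.Str.replace (PySem.Str.replace s ":" ": ") "#" " # ") " ").getD []).filter
    (fun t => t != "")

def pvT1 (P : List String) : List String :=
  if P.contains "#" then
    PySem.List.slice P (some 0) (some (((PySem.List.index? P "#").getD 0 : Nat) : Int))
  else P

def pvT2 (P : List String) : List String :=
  if PySem.Str.isIn ":" ((PySem.List.pyGet? P 0).getD "") then PySem.List.slice P (some 1) none else P

-- per-line value on a kept line (the composed maps of A)
def pvLineF (line : String) : List String :=
  (pvT2 (pvT1 (pvToksOf (PySem.Str.stripChars line " ")))).map (fun y => PySem.Str.replace y "," "")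

-- per-line keep/drop decision: A's filters, in the exact shape List.filter_filter produces
def pvLineP (line : String) : Bool :=
  (pvT2 (pvT1 (pvToksOf (PySem.Str.stripChars line " "))) != ([] : List String)) &&
    ((!(PySem.Str.pyGet? ((PySem.List.pyGet? (pvToksOf (PySem.Str.stripChars line " ")) 0).getD "") 0 == some '#')) &&
      (((PySem.Str.replace (PySem.Str.replace (PySem.Str.stripChars line " ") ":" ": ") "#" " # ") != "") &&
        (((PySem.Str.replace (PySem.Str.stripChars line " ") ":" ": ") != "") &&
          (((PySem.Str.stripChars line " ") != "") && ((PySem.Str.stripChars line " ") != "")))))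

set_option maxHeartbeats 2000000 in
lemma pvA_shape (asmStr : String) :
    asmStr2AsmList asmStr
      = ((((PySem.Str.split? asmStr "\n").getD []).filter pvLineP).map pvLineF) := by
  simp only [asmStr2AsmList]
  simp only [List.map_map]
  simp only [List.filter_map]
  simp only [List.filter_filter]
  simp only [List.map_map]
  refine Eq.trans (congrArg _ (List.filter_congr fun a _ => ?_)) (List.map_congr_left fun a _ => ?_)
  · simp only [Function.comp_apply, pvLineP, pvToksOf, pvT1, pvT2]
  · simp only [Function.comp_apply, pvLineF, pvToksOf, pvT1, pvT2]

-- structural versions of the two replaces and the split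
def pvRepC : List Char → List Char
  | [] => []
  | c :: r => if c = ':' then ':' :: ' ' :: pvRepC r else c :: pvRepC r

def pvRepH : List Char → List Char
  | [] => []
  | c :: r => if c = '#' then ' ' :: '#' :: ' ' :: pvRepH r else c :: pvRepH r

def pvSplitAux : List Char → List Char → List (List Char)
  | cur, [] => [cur.reverse]
  | cur, c :: r => if c = ' ' then cur.reverse :: pvSplitAux [] r else pvSplitAux (c :: cur) r

-- token list of one (already stripped) line: pending token p, rest of the chars
def pvFTok : List Char → List Char → List (List Char)
  | p, [] => if p = [] then [] else [p]
  | p, c :: r =>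
    if c = ' ' then (if p = [] then [] else [p]) ++ pvFTok [] r
    else if c = ':' then (p ++ [':']) :: pvFTok [] r
    else if c = '#' then (if p = [] then [] else [p]) ++ ['#'] :: pvFTok [] r
    else pvFTok (p ++ [c]) r

-- tokens before the first '#'
def pvPre : List Char → List Char → List (List Char)
  | p, [] => if p = [] then [] else [p]
  | p, c :: r =>
    if c = '#' then (if p = [] then [] else [p])
    else if c = ' ' then (if p = [] then [] else [p]) ++ pvPre [] r
    else if c = ':' then (p ++ [':']) :: pvPre [] r
    else pvPre (p ++ [c]) r

-- the common per-line contribution both programs compute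
def pvLine (s : String) : List (List String) :=
  if (pvFTok [] s.toList).head? = some ['#'] then []
  else
    let t2 := pvT2 ((List.takeWhile (fun t => t != ['#']) (pvFTok [] s.toList)).map String.ofList)
    if t2 = [] then [] else [t2.map (fun y => PySem.Str.replace y "," "")]

lemma pvRepC_go (fuel : Nat) (l acc : List Char) (h : l.length ≤ fuel) :
    PySem.Chars.replace.go [':'] [':', ' '] fuel l acc = acc.reverse ++ pvRepC l := by
  induction fuel generalizing l acc with
  | zero =>
    have hl : l = [] := by cases l with | nil => rfl | cons a t => simp at h
    subst hl
    simp [PySem.Chars.replace.go, pvRepC]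
  | succ n ih =>
    cases l with
    | nil => simp [PySem.Chars.replace.go, pvRepC]
    | cons c t =>
      by_cases hc : c = ':'
      · subst hc
        have hpre : ([':'] : List Char).isPrefixOf (':' :: t) = true := by
          simp [List.isPrefixOf]
        simp only [PySem.Chars.replace.go, hpre, if_true]
        rw [ih _ _ (by simpa using h)]
        simp [pvRepC]
      · have hpre : ([':'] : List Char).isPrefixOf (c :: t) = false := by
          have hbe : (':' == c) = false := beq_eq_false_iff_ne.mpr (fun e => hc e.symm)
          simp [List.isPrefixOf, hbe]
        simp only [PySem.Chars.replace.go, hpre, Bool.false_eq_true, if_false]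
        rw [ih _ _ (by simpa using h)]
        simp [pvRepC, hc]

lemma pvRepC_eq (cs : List Char) : PySem.Chars.replace cs [':'] [':', ' '] = pvRepC cs := by
  simp [PySem.Chars.replace, pvRepC_go cs.length cs [] (le_refl _)]

lemma pvRepH_go (fuel : Nat) (l acc : List Char) (h : l.length ≤ fuel) :
    PySem.Chars.replace.go ['#'] [' ', '#', ' '] fuel l acc = acc.reverse ++ pvRepH l := by
  induction fuel generalizing l acc with
  | zero =>
    have hl : l = [] := by cases l with | nil => rfl | cons a t => simp at h
    subst hl
    simp [PySem.Chars.replace.go, pvRepH]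
  | succ n ih =>
    cases l with
    | nil => simp [PySem.Chars.replace.go, pvRepH]
    | cons c t =>
      by_cases hc : c = '#'
      · subst hc
        have hpre : (['#'] : List Char).isPrefixOf ('#' :: t) = true := by
          simp [List.isPrefixOf]
        simp only [PySem.Chars.replace.go, hpre, if_true]
        rw [ih _ _ (by simpa using h)]
        simp [pvRepH]
      · have hpre : (['#'] : List Char).isPrefixOf (c :: t) = false := by
          have hbe : ('#' == c) = false := beq_eq_false_iff_ne.mpr (fun e => hc e.symm)
          simp [List.isPrefixOf, hbe]
        simp only [PySem.Chars.replace.go, hpre, Bool.false_eq_true, if_false]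
        rw [ih _ _ (by simpa using h)]
        simp [pvRepH, hc]

lemma pvRepH_eq (cs : List Char) : PySem.Chars.replace cs ['#'] [' ', '#', ' '] = pvRepH cs := by
  simp [PySem.Chars.replace, pvRepH_go cs.length cs [] (le_refl _)]

lemma pvSplit_go (fuel : Nat) (l cur : List Char) (acc : List (List Char)) (h : l.length ≤ fuel) :
    PySem.Chars.splitOn.go [' '] fuel l cur acc = acc.reverse ++ pvSplitAux cur l := by
  induction fuel generalizing l cur acc with
  | zero =>
    have hl : l = [] := by cases l with | nil => rfl | cons a t => simp at h
    subst hl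
    simp [PySem.Chars.splitOn.go, pvSplitAux]
  | succ n ih =>
    cases l with
    | nil => simp [PySem.Chars.splitOn.go, pvSplitAux]
    | cons c t =>
      by_cases hc : c = ' '
      · subst hc
        have hpre : ([' '] : List Char).isPrefixOf (' ' :: t) = true := by
          simp [List.isPrefixOf]
        simp only [PySem.Chars.splitOn.go, hpre, if_true]
        rw [ih _ _ _ (by simpa using h)]
        simp [pvSplitAux]
      · have hpre : ([' '] : List Char).isPrefixOf (c :: t) = false := by
          have hbe : (' ' == c) = false := beq_eq_false_iff_ne.mpr (fun e => hc e.symm)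
          simp [List.isPrefixOf, hbe]
        simp only [PySem.Chars.splitOn.go, hpre, Bool.false_eq_true, if_false]
        rw [ih _ _ _ (by simpa using h)]
        simp [pvSplitAux, hc]

lemma pvSplit_eq (cs : List Char) : PySem.Chars.splitOn cs [' '] = pvSplitAux [] cs := by
  simp [PySem.Chars.splitOn, pvSplit_go (cs.length + 1) cs [] [] (by omega)]

lemma pvFTok_eq (cs : List Char) : ∀ cur : List Char,
    (pvSplitAux cur (pvRepH (pvRepC cs))).filter (fun t => t != []) = pvFTok cur.reverse cs := by
  induction cs with
  | nil =>
    intro cur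
    by_cases hcur : cur.reverse = []
    · simp [pvRepC, pvRepH, pvSplitAux, pvFTok, hcur]
    · simp [pvRepC, pvRepH, pvSplitAux, pvFTok, hcur]
  | cons c r ih =>
    intro cur
    by_cases h1 : c = ':'
    · subst h1
      by_cases hcur : cur.reverse = []
      · simp [pvRepC, pvRepH, pvSplitAux, pvFTok, hcur, ih []]
      · simp [pvRepC, pvRepH, pvSplitAux, pvFTok, hcur, ih []]
    · by_cases h2 : c = '#'
      · subst h2
        by_cases hcur : cur.reverse = []
        · simp [pvRepC, pvRepH, pvSplitAux, pvFTok, hcur, ih []]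
        · simp [pvRepC, pvRepH, pvSplitAux, pvFTok, hcur, ih []]
      · by_cases h3 : c = ' '
        · subst h3
          by_cases hcur : cur.reverse = []
          · simp [pvRepC, pvRepH, pvSplitAux, pvFTok, hcur, ih []]
          · simp [pvRepC, pvRepH, pvSplitAux, pvFTok, hcur, ih []]
        · simp [pvRepC, pvRepH, pvSplitAux, pvFTok, h1, h2, h3, ih (c :: cur)]

lemma pvScan_spec (cs : List Char) : ∀ (toks : List String) (cur : List Char),
    pvScan cs toks cur
      = (toks ++ (pvPre cur cs).map String.ofList,
         if cs.contains '#' then ((toks ++ (pvPre cur cs).map String.ofList) == []) else false) := by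
  induction cs with
  | nil =>
    intro toks cur
    by_cases hcur : cur = []
    · simp [pvScan, pvPre, hcur]
    · simp [pvScan, pvPre, hcur]
  | cons c r ih =>
    intro toks cur
    by_cases h1 : c = '#'
    · subst h1
      by_cases hcur : cur = []
      · simp [pvScan, pvPre, hcur]
      · simp [pvScan, pvPre, hcur]
    · have h1s : ('#' : Char) ≠ c := fun e => h1 e.symm
      by_cases h2 : c = ' '
      · subst h2
        by_cases hcur : cur = []
        · simp [pvScan, pvPre, hcur, ih, List.append_assoc]
        · simp [pvScan, pvPre, hcur, ih, List.append_assoc]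
      · by_cases h3 : c = ':'
        · subst h3
          simp [pvScan, pvPre, ih, List.append_assoc, h1]
        · simp [pvScan, pvPre, ih, h1, h2, h3, h1s]

lemma pvNeHash (p : List Char) (hp : '#' ∉ p) : p ≠ ['#'] := fun e => hp (by simp [e])

lemma pvColonNeHash (p : List Char) : p ++ [':'] ≠ ['#'] := by
  intro e
  have h : (p ++ [':']).getLast? = some ':' := by simp
  rw [e] at h
  simp at h

lemma pvPre_takeWhile (cs : List Char) : ∀ p : List Char, '#' ∉ p →
    pvPre p cs = (pvFTok p cs).takeWhile (fun t => t != ['#']) := by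
  induction cs with
  | nil =>
    intro p hp
    by_cases hp0 : p = []
    · simp [pvPre, pvFTok, hp0]
    · simp [pvPre, pvFTok, hp0, pvNeHash p hp, (pvNeHash p hp).symm]
  | cons c r ih =>
    intro p hp
    by_cases h1 : c = '#'
    · subst h1
      by_cases hp0 : p = []
      · simp [pvPre, pvFTok, hp0]
      · simp [pvPre, pvFTok, hp0, pvNeHash p hp, (pvNeHash p hp).symm]
    · by_cases h2 : c = ' '
      · subst h2
        by_cases hp0 : p = []
        · simp [pvPre, pvFTok, hp0, ih [] (by simp)]
        · simp [pvPre, pvFTok, hp0, pvNeHash p hp, (pvNeHash p hp).symm, ih [] (by simp)]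
      · by_cases h3 : c = ':'
        · subst h3
          simp [pvPre, pvFTok, h1, pvColonNeHash p, (pvColonNeHash p).symm, ih [] (by simp)]
        · have hp' : '#' ∉ p ++ [c] := by
            intro hmem
            rcases List.mem_append.mp hmem with hh | hh
            · exact hp hh
            · simp at hh
              exact h1 hh.symm
          simp [pvPre, pvFTok, h1, h2, h3, ih (p ++ [c]) hp']

lemma pvMem_hash (cs : List Char) : ∀ p : List Char, '#' ∉ p →
    ((['#'] : List Char) ∈ pvFTok p cs ↔ '#' ∈ cs) := by
  induction cs with
  | nil =>
    intro p hp
    by_cases hp0 : p = []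
    · simp [pvFTok, hp0]
    · simp [pvFTok, hp0, pvNeHash p hp, (pvNeHash p hp).symm]
  | cons c r ih =>
    intro p hp
    by_cases h1 : c = '#'
    · subst h1
      by_cases hp0 : p = []
      · simp [pvFTok, hp0]
      · simp [pvFTok, hp0]
    · have h1s : ('#' : Char) ≠ c := fun e => h1 e.symm
      by_cases h2 : c = ' '
      · subst h2
        by_cases hp0 : p = []
        · simp [pvFTok, hp0, ih [] (by simp)]
        · simp [pvFTok, hp0, pvNeHash p hp, (pvNeHash p hp).symm, ih [] (by simp)]
      · by_cases h3 : c = ':'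
        · subst h3
          simp [pvFTok, h1, pvColonNeHash p, (pvColonNeHash p).symm, ih [] (by simp)]
        · have hp' : '#' ∉ p ++ [c] := by
            intro hmem
            rcases List.mem_append.mp hmem with hh | hh
            · exact hp hh
            · simp at hh
              exact h1 hh.symm
          simp [pvFTok, h1, h2, h3, h1s, ih (p ++ [c]) hp']

lemma pvFTok_mem (cs : List Char) : ∀ p : List Char, '#' ∉ p →
    ∀ t ∈ pvFTok p cs, t ≠ [] ∧ (t = ['#'] ∨ '#' ∉ t) := by
  induction cs with
  | nil =>
    intro p hp t ht
    by_cases hp0 : p = []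
    · simp [pvFTok, hp0] at ht
    · simp [pvFTok, hp0] at ht
      subst ht
      exact ⟨hp0, Or.inr hp⟩
  | cons c r ih =>
    intro p hp t ht
    by_cases h1 : c = '#'
    · subst h1
      by_cases hp0 : p = []
      · simp [pvFTok, hp0] at ht
        rcases ht with rfl | ht
        · exact ⟨by simp, Or.inl rfl⟩
        · exact ih [] (by simp) t ht
      · simp [pvFTok, hp0] at ht
        rcases ht with rfl | rfl | ht
        · exact ⟨hp0, Or.inr hp⟩
        · exact ⟨by simp, Or.inl rfl⟩
        · exact ih [] (by simp) t ht
    · by_cases h2 : c = ' '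
      · subst h2
        by_cases hp0 : p = []
        · simp [pvFTok, hp0] at ht
          exact ih [] (by simp) t ht
        · simp [pvFTok, hp0] at ht
          rcases ht with rfl | ht
          · exact ⟨hp0, Or.inr hp⟩
          · exact ih [] (by simp) t ht
      · by_cases h3 : c = ':'
        · subst h3
          simp [pvFTok, h1] at ht
          rcases ht with rfl | ht
          · refine ⟨by simp, Or.inr ?_⟩
            intro hmem
            rcases List.mem_append.mp hmem with hh | hh
            · exact hp hh
            · simp at hh
          · exact ih [] (by simp) t ht
        · have hp' : '#' ∉ p ++ [c] := by
            intro hmem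
            rcases List.mem_append.mp hmem with hh | hh
            · exact hp hh
            · simp at hh
              exact h1 hh.symm
          simp [pvFTok, h1, h2, h3] at ht
          exact ih (p ++ [c]) hp' t ht

lemma pvRepC_ne_nil (cs : List Char) (h : cs ≠ []) : pvRepC cs ≠ [] := by
  cases cs with
  | nil => exact absurd rfl h
  | cons c r => by_cases hc : c = ':' <;> simp [pvRepC, hc]

lemma pvRepH_ne_nil (cs : List Char) (h : cs ≠ []) : pvRepH cs ≠ [] := by
  cases cs with
  | nil => exact absurd rfl h
  | cons c r => by_cases hc : c = '#' <;> simp [pvRepH, hc]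

lemma pvOfList_inj : Function.Injective String.ofList := by
  intro a b e
  have := congrArg String.toList e
  simpa using this

lemma pvOfList_beq (t u : List Char) : (String.ofList t == String.ofList u) = (t == u) := by
  by_cases h : t = u
  · subst h; simp
  · have hne : String.ofList t ≠ String.ofList u := fun e => h (pvOfList_inj e)
    simp [h, hne]

lemma pvBneOfList (t u : List Char) : (String.ofList t != String.ofList u) = (t != u) := by
  rw [bne, bne, pvOfList_beq]

lemma pvEmptyLit : ("" : String) = String.ofList [] := by decide

lemma pvHashLit : ("#" : String) = String.ofList ['#'] := by decide

lemma pvRepToList1 (s : String) :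
    (PySem.Str.replace s ":" ": ").toList = pvRepC s.toList := by
  rw [PySem.Str.toList_replace]
  have e1 : (":" : String).toList = [':'] := by decide
  have e2 : (": " : String).toList = [':', ' '] := by decide
  rw [e1, e2, pvRepC_eq]

lemma pvRepToList (s : String) :
    (PySem.Str.replace (PySem.Str.replace s ":" ": ") "#" " # ").toList = pvRepH (pvRepC s.toList) := by
  rw [PySem.Str.toList_replace]
  have e3 : ("#" : String).toList = ['#'] := by decide
  have e4 : (" # " : String).toList = [' ', '#', ' '] := by decide
  rw [e3, e4, pvRepH_eq, pvRepToList1]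

lemma pvToks_eq (s : String) :
    pvToksOf s = (pvFTok [] s.toList).map String.ofList := by
  have e5 : (" " : String).toList = [' '] := by decide
  have h3 : PySem.Str.split? (PySem.Str.replace (PySem.Str.replace s ":" ": ") "#" " # ") " "
      = some ((pvSplitAux [] (pvRepH (pvRepC s.toList))).map String.ofList) := by
    unfold PySem.Str.split?
    rw [pvRepToList, e5]
    simp [PySem.Chars.split?, pvSplit_eq]
  rw [pvToksOf, h3, Option.getD_some, List.filter_map]
  have h4 : ∀ t ∈ pvSplitAux [] (pvRepH (pvRepC s.toList)),
      ((fun t => t != "") ∘ String.ofList) t = (fun t : List Char => t != []) t := by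
    intro t _
    show (String.ofList t != "") = (t != [])
    rw [pvEmptyLit, pvBneOfList]
  rw [List.filter_congr h4, pvFTok_eq]
  simp

lemma pvSlice0 (l : List String) (k : Nat) :
    PySem.List.slice l (some 0) (some (k : Int)) = l.take k := by
  have h0 : PySem.List.clampIdx l.length (0 : Int) = 0 := by simp [PySem.List.clampIdx]
  have hk : PySem.List.clampIdx l.length (k : Int) = min k l.length := by
    simp [PySem.List.clampIdx]
  simp only [PySem.List.slice, h0, hk, Nat.sub_zero, List.drop_zero]
  rcases le_total k l.length with h | h
  · rw [min_eq_left h]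
  · rw [min_eq_right h, List.take_length, List.take_of_length_le h]

lemma pvTake_idx (l : List String) (a : String) (h : a ∈ l) :
    l.take ((PySem.List.index? l a).getD 0) = l.takeWhile (fun t => t != a) := by
  induction l with
  | nil => simp at h
  | cons b bs ih =>
    by_cases hb : b = a
    · subst hb
      simp [PySem.List.index?, List.idxOf?_cons]
    · have ha : a ∈ bs := by
        rcases List.mem_cons.mp h with h' | h'
        · exact absurd h'.symm hb
        · exact h'
      rcases e : List.findIdx? (fun x => x == a) bs with _ | k
      · exfalso
        have := List.findIdx?_eq_none_iff.mp e a ha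
        simp at this
      · have hgoal := ih ha
        simp only [PySem.List.index?, List.idxOf?, e, Option.getD_some] at hgoal
        have hba : (b == a) = false := beq_eq_false_iff_ne.mpr hb
        have hbna : (b != a) = true := by simp [bne, hba]
        simp only [PySem.List.index?, List.idxOf?, List.findIdx?_cons, hba, Bool.false_eq_true,
          if_false, e, Option.map_some, Option.getD_some, List.take_succ_cons, List.takeWhile_cons,
          hbna, if_true]
        rw [hgoal]

lemma pvT1_nil : pvT1 [] = [] := by decide

lemma pvT2_nil : pvT2 [] = [] := by decide

lemma pvT1_map (T : List (List Char)) :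
    pvT1 (T.map String.ofList) = (List.takeWhile (fun t => t != ['#']) T).map String.ofList := by
  by_cases hc : ("#" : String) ∈ T.map String.ofList
  · have hcb : (T.map String.ofList).contains "#" = true := by simp [hc]
    simp only [pvT1, hcb, if_true]
    rw [pvSlice0, pvTake_idx _ _ hc, List.takeWhile_map]
    have hfun : ((fun t => t != "#") ∘ String.ofList) = (fun t : List Char => t != ['#']) := by
      funext t
      show (String.ofList t != "#") = (t != ['#'])
      rw [pvHashLit, pvBneOfList]
    rw [hfun]
  · have hcb : (T.map String.ofList).contains "#" = false := by simp [hc]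
    simp only [pvT1, hcb, Bool.false_eq_true, if_false]
    have hself : List.takeWhile (fun t => t != ['#']) T = T := by
      apply List.takeWhile_eq_self_iff.mpr
      intro t ht
      have hne : t ≠ ['#'] := by
        intro e
        apply hc
        rw [pvHashLit]
        exact List.mem_map_of_mem (by rwa [e] at ht)
      simp [hne]
    rw [hself]

lemma pvGetCons {α : Type} (x : α) (xs : List α) : PySem.List.pyGet? (x :: xs) 0 = some x := by
  simp [PySem.List.pyGet?, PySem.List.pyIdx?]

lemma pvHashHead : PySem.Str.pyGet? (String.ofList ['#']) 0 = some '#' := by decide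

lemma pvToListNil (s : String) (e : s.toList = []) : s = "" :=
  String.toList_inj.mp (by rw [e]; decide)

-- A's per-line contribution is pvLine
set_option maxHeartbeats 2000000 in
lemma pvLineA (l : String) :
    (if pvLineP l then [pvLineF l] else []) = pvLine (PySem.Str.stripChars l " ") := by
  by_cases hs : PySem.Str.stripChars l " " = ""
  · have hsb : (PySem.Str.stripChars l " " != "") = false := by simp [hs]
    have hP : pvLineP l = false := by
      simp only [pvLineP, hsb, Bool.false_and, Bool.and_false]
    have h0 : (PySem.Str.stripChars l " ").toList = ([] : List Char) := by rw [hs]; decide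
    simp [hP, pvLine, h0, pvFTok, pvT2_nil]
  · have hsl : (PySem.Str.stripChars l " ").toList ≠ [] := fun e => hs (pvToListNil _ e)
    have hr1 : (PySem.Str.replace (PySem.Str.stripChars l " ") ":" ": ") ≠ "" := by
      intro e
      apply pvRepC_ne_nil _ hsl
      rw [← pvRepToList1, e]
      decide
    have hr2 : (PySem.Str.replace (PySem.Str.replace (PySem.Str.stripChars l " ") ":" ": ") "#" " # ") ≠ "" := by
      intro e
      apply pvRepH_ne_nil _ (pvRepC_ne_nil _ hsl)
      rw [← pvRepToList, e]
      decide
    have hsb : (PySem.Str.stripChars l " " != "") = true := by simp [hs]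
    have hb1 : ((PySem.Str.replace (PySem.Str.stripChars l " ") ":" ": ") != "") = true := by simp [hr1]
    have hb2 : ((PySem.Str.replace (PySem.Str.replace (PySem.Str.stripChars l " ") ":" ": ") "#" " # ") != "") = true := by
      simp [hr2]
    rcases hTc : pvFTok [] (PySem.Str.stripChars l " ").toList with _ | ⟨t0, rest⟩
    · have hP : pvLineP l = false := by
        simp only [pvLineP, pvToks_eq, hTc, List.map_nil, pvT1_nil, pvT2_nil]
        simp
      have hTc' := hTc
      rw [show (PySem.Str.stripChars l " ").toList = PySem.Chars.stripChars l.toList [' '] by simp] at hTc'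
      simp [hP, pvLine, hTc', pvT2_nil]
    · have hmem := pvFTok_mem (PySem.Str.stripChars l " ").toList [] (by simp)
      obtain ⟨ht0ne, ht0or⟩ := hmem t0 (by rw [hTc]; exact List.mem_cons_self)
      by_cases h0 : t0 = ['#']
      · subst h0
        have hP : pvLineP l = false := by
          simp only [pvLineP, pvToks_eq, hTc, List.map_cons, pvGetCons, Option.getD_some,
            pvHashHead, beq_self_eq_true, Bool.not_true, Bool.false_and, Bool.and_false]
        have hTc' := hTc
        rw [show (PySem.Str.stripChars l " ").toList = PySem.Chars.stripChars l.toList [' '] by simp] at hTc'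
        simp [hP, pvLine, hTc']
      · have ht0h : '#' ∉ t0 := ht0or.resolve_left h0
        obtain ⟨c0, t0t, rfl⟩ : ∃ c ts, t0 = c :: ts := by
          cases t0 with
          | nil => exact absurd rfl ht0ne
          | cons a b => exact ⟨a, b, rfl⟩
        have hc0 : c0 ≠ '#' := fun e => ht0h (by simp [e])
        have hhead : (PySem.Str.pyGet? (String.ofList (c0 :: t0t)) 0 == some '#') = false := by
          have hv : PySem.Str.pyGet? (String.ofList (c0 :: t0t)) 0 = some c0 := by
            simp [PySem.Str.pyGet?_eq]
          rw [hv]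
          simp [hc0]
        have hcond : ¬ ((pvFTok [] (PySem.Str.stripChars l " ").toList).head? = some ['#']) := by
          rw [hTc]
          simp [h0]
        have hT1 : pvT1 (pvToksOf (PySem.Str.stripChars l " "))
            = (List.takeWhile (fun t => t != ['#']) ((c0 :: t0t) :: rest)).map String.ofList := by
          rw [pvToks_eq, hTc, pvT1_map]
        have htw : List.takeWhile (fun t => t != ['#']) ((c0 :: t0t) :: rest)
            = (c0 :: t0t) :: List.takeWhile (fun t => t != ['#']) rest := by
          simp [h0]
        simp only [pvLineP, pvLineF, pvLine]
        rw [if_neg hcond, hT1, htw]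
        simp only [pvToks_eq, hTc, htw, List.map_cons, pvGetCons, Option.getD_some, hhead,
          Bool.not_false, hsb, hb1, hb2, Bool.and_true]
        split_ifs <;> simp_all

-- B's per-line contribution is pvLine
set_option maxHeartbeats 2000000 in
lemma pvBodyB (acc : List (List String)) (l : String) :
    pvStep acc l = acc ++ pvLine (PySem.Str.stripChars l " ") := by
  have hSL : (PySem.Str.stripChars l " ").toList = PySem.Chars.stripChars l.toList [' '] := by simp
  have hpre := pvPre_takeWhile (PySem.Str.stripChars l " ").toList [] (by simp)
  rcases hTc : pvFTok [] (PySem.Str.stripChars l " ").toList with _ | ⟨t0, rest⟩ <;> rw [hTc] at hpre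
  · rw [hSL] at hpre hTc
    simp only [List.takeWhile_nil] at hpre
    simp [pvStep, pvScan_spec, hpre, hTc, pvLine, pvT2_nil]
  · by_cases h0 : t0 = ['#']
    · subst h0
      have h1 : '#' ∈ (PySem.Str.stripChars l " ").toList :=
        (pvMem_hash _ [] (by simp)).mp (by rw [hTc]; exact List.mem_cons_self)
      rw [hSL] at hpre hTc h1
      simp [pvStep, pvScan_spec, hpre, hTc, pvLine, h1]
    · have h0b : (t0 != ['#']) = true := by simp [h0]
      rw [hSL] at hpre hTc
      simp [pvStep, pvScan_spec, hpre, hTc, pvLine, h0, h0b, pvT2]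
      split_ifs <;> simp_all

lemma pvMF (ls : List String) :
    (ls.filter pvLineP).map pvLineF = ls.flatMap (fun l => pvLine (PySem.Str.stripChars l " ")) := by
  induction ls with
  | nil => rfl
  | cons l t ih =>
    have hA := pvLineA l
    rw [List.filter_cons, List.flatMap_cons, ← hA, ← ih]
    by_cases h : pvLineP l <;> simp [h]

lemma pvB_loop (ls : List String) (acc : List (List String)) :
    ls.foldl pvStep acc = acc ++ ls.flatMap (fun l => pvLine (PySem.Str.stripChars l " ")) := by
  induction ls generalizing acc with
  | nil => simp
  | cons l ls ih =>
    rw [List.foldl_cons, pvBodyB acc l, ih, List.flatMap_cons, List.append_assoc]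

lemma pvB_shape (asmStr : String) :
    asmStr2AsmList_alt asmStr
      = ((PySem.Str.split? asmStr "\n").getD []).flatMap (fun l => pvLine (PySem.Str.stripChars l " ")) := by
  rw [asmStr2AsmList_alt, pvB_loop, List.nil_append]

-- ===== VERDICT (by name: the statement is the Claim_ definition above) =====
theorem asmStr2AsmList_spec : Claim_equal_asmStr2AsmList := by
  intro asmStr _
  unfold Spec_asmStr2AsmList
  rw [pvA_shape, pvMF, pvB_shape]
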